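-- pv_equiv track=rewrite | github.com/SIDPaper/DiEmph | trex/diemph_eval.py | build_input_tokens
-- ===== SOURCE A (Python) =====
-- def build_input_tokens(instr_list, max_token=510, bos=True):
--     if bos:
--         static = ['<s>']
--         inst_pos_emb = ['<s>']
--         op_pos_emb = ['<s>']
--         arch_emb = ['<s>']
--         byte1 = ['<s>']
--     else:
--         static = []
--         inst_pos_emb = []
--         op_pos_emb = []
--         arch_emb = []
--         byte1 = []
--     instr_cnt = 0
--     token_cnt = 0
--     for i in instr_list:
--         ops = i.split()
--         length = len(ops)
--         token_cnt += length
--         if token_cnt >= max_token: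
--             break
--         static.extend(ops)
--         inst_pos_emb.extend([str(instr_cnt)] * length)
--         op_pos_emb.extend([str(i) for i in range(length)])
--         arch_emb.extend(['x64'] * length)
--         byte1.extend(['##'] * length)
--         instr_cnt += 1
--     return {
--         'static': ' '.join(static),
--         'inst_pos_emb': ' '.join(inst_pos_emb),
--         'op_pos_emb': ' '.join(op_pos_emb),
--         'arch_emb': ' '.join(arch_emb),
--         'byte1': ' '.join(byte1),
--         'byte2': ' '.join(byte1),
--         'byte3': ' '.join(byte1),
--         'byte4': ' '.join(byte1),
--     }
-- ===== SOURCE B (Python) =====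
-- def build_input_tokens(instr_list, max_token=510, bos=True):
--     # Find the kept prefix first (cumulative token count), then build each
--     # field with one flat comprehension over that prefix.
--     lens = [len(s.split()) for s in instr_list]
--     k = 0
--     total = 0
--     for l in lens:
--         if total + l >= max_token:
--             break
--         total += l
--         k += 1
--     pre = ['<s>'] if bos else []
--     kept = instr_list[:k]
--     klens = lens[:k]
--     n = sum(klens)
--     static = ' '.join(pre + [t for s in kept for t in s.split()])
--     inst_pos = ' '.join(pre + [str(j) for j, l in enumerate(klens) for _ in range(l)])
--     op_pos = ' '.join(pre + [str(p) for l in klens for p in range(l)])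
--     arch = ' '.join(pre + ['x64'] * n)
--     byte = ' '.join(pre + ['##'] * n)
--     return {'static': static, 'inst_pos_emb': inst_pos, 'op_pos_emb': op_pos,
--             'arch_emb': arch, 'byte1': byte, 'byte2': byte, 'byte3': byte, 'byte4': byte}
-- ===== Notes on version B (the rewrite author's own statement) =====
-- stated objective: alternative
-- what changed: A builds five parallel token lists incrementally inside one loop with running counters; B first computes per-instruction token lengths and a cumulative-sum cutoff index k, then builds each field with a single flat comprehension over the kept prefix.
import Mathlib
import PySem

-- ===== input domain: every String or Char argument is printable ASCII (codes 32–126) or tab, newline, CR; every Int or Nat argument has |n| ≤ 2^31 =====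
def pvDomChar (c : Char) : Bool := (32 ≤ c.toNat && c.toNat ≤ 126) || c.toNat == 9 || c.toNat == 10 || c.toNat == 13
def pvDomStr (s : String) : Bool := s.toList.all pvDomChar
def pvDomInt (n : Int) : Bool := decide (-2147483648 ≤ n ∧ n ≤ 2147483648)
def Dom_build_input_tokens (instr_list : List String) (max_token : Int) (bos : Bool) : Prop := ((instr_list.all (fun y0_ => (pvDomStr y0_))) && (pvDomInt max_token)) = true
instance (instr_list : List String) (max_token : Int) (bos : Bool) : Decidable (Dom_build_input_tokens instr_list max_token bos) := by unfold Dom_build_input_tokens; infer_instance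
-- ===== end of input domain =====

-- ===== PORT A =====
-- B changes the decomposition (cutoff index + flat comprehensions instead of one
-- accumulating loop); same cost, return value proved identical.
def pvLoopA (max_token : Int) (instrs : List String)
    (static inst op arch b1 : List String) (instr_cnt token_cnt : Int) :
    List String × List String × List String × List String × List String :=
  match instrs with
  | [] => (static, inst, op, arch, b1)
  | i :: rest =>
    let ops := PySem.Str.split₀ i
    let length := ops.length
    let token_cnt' := token_cnt + (length : Int)
    if max_token ≤ token_cnt' then (static, inst, op, arch, b1)
    else pvLoopA max_token rest (static ++ ops)
      (inst ++ List.replicate length (PySem.Int.toStr instr_cnt))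
      (op ++ (PySem.List.pyRange 0 (length : Int) 1).map PySem.Int.toStr)
      (arch ++ List.replicate length "x64")
      (b1 ++ List.replicate length "##")
      (instr_cnt + 1) token_cnt'

def build_input_tokens (instr_list : List String) (max_token : Int) (bos : Bool) : List (String × String) :=
  let init : List String := if bos then ["<s>"] else []
  let r := pvLoopA max_token instr_list init init init init init 0 0
  [("static", PySem.Str.join " " r.1),
   ("inst_pos_emb", PySem.Str.join " " r.2.1),
   ("op_pos_emb", PySem.Str.join " " r.2.2.1),
   ("arch_emb", PySem.Str.join " " r.2.2.2.1),
   ("byte1", PySem.Str.join " " r.2.2.2.2),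
   ("byte2", PySem.Str.join " " r.2.2.2.2),
   ("byte3", PySem.Str.join " " r.2.2.2.2),
   ("byte4", PySem.Str.join " " r.2.2.2.2)]

-- ===== PORT B =====
def pvCut (max_token : Int) : List Nat → Int → Nat
  | [], _ => 0
  | l :: rest, total => if max_token ≤ total + (l : Int) then 0 else pvCut max_token rest (total + (l : Int)) + 1

def build_input_tokens_alt (instr_list : List String) (max_token : Int) (bos : Bool) : List (String × String) :=
  let lens := instr_list.map (fun s => (PySem.Str.split₀ s).length)
  let k := pvCut max_token lens 0
  let pre : List String := if bos then ["<s>"] else []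
  let kept := instr_list.take k
  let klens := lens.take k
  let n := klens.sum
  let static := PySem.Str.join " " (pre ++ kept.flatMap (fun s => PySem.Str.split₀ s))
  let instPos := PySem.Str.join " " (pre ++ (PySem.List.enumerate klens 0).flatMap (fun jl => List.replicate jl.2 (PySem.Int.toStr jl.1)))
  let opPos := PySem.Str.join " " (pre ++ klens.flatMap (fun l => (PySem.List.pyRange 0 (l : Int) 1).map PySem.Int.toStr))
  let arch := PySem.Str.join " " (pre ++ List.replicate n "x64")
  let byte := PySem.Str.join " " (pre ++ List.replicate n "##")
  [("static", static), ("inst_pos_emb", instPos), ("op_pos_emb", opPos),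
   ("arch_emb", arch), ("byte1", byte), ("byte2", byte), ("byte3", byte), ("byte4", byte)]

-- ===== PRECONDITION & SPEC =====
def Spec_build_input_tokens (instr_list : List String) (max_token : Int) (bos : Bool) (out : List (String × String)) : Prop := out = build_input_tokens_alt instr_list max_token bos
instance (instr_list : List String) (max_token : Int) (bos : Bool) (out : List (String × String)) : Decidable (Spec_build_input_tokens instr_list max_token bos out) := by unfold Spec_build_input_tokens; infer_instance

-- ===== CLAIM (what is proved, stated in full; the proofs are below) =====
def Claim_equal_build_input_tokens : Prop := ∀ (instr_list : List String) (max_token : Int) (bos : Bool), Dom_build_input_tokens instr_list max_token bos → Spec_build_input_tokens instr_list max_token bos (build_input_tokens instr_list max_token bos)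

-- ===== LEMMAS AND PROOFS =====
lemma pvLoopA_spec (max_token : Int) (instrs : List String)
    (s i o a b : List String) (c tok : Int) :
    pvLoopA max_token instrs s i o a b c tok =
      (let lens := instrs.map (fun x => (PySem.Str.split₀ x).length)
       let k := pvCut max_token lens tok
       (s ++ (instrs.take k).flatMap (fun x => PySem.Str.split₀ x),
        i ++ (PySem.List.enumerate (lens.take k) c).flatMap (fun jl => List.replicate jl.2 (PySem.Int.toStr jl.1)),
        o ++ (lens.take k).flatMap (fun l => (PySem.List.pyRange 0 (l : Int) 1).map PySem.Int.toStr),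
        a ++ List.replicate (lens.take k).sum "x64",
        b ++ List.replicate (lens.take k).sum "##")) := by
  induction instrs generalizing s i o a b c tok with
  | nil => simp [pvLoopA, pvCut]
  | cons x rest ih =>
    simp only [pvLoopA, pvCut, List.map_cons]
    split_ifs with h
    · simp

    · rw [ih]
      simp [List.take_succ_cons, PySem.List.enumerate_cons, List.replicate_add,
        List.append_assoc, -List.replicate_append_replicate]

-- ===== VERDICT (by name: the statement is the Claim_ definition above) =====
theorem build_input_tokens_spec : Claim_equal_build_input_tokens := by
  intro instr_list max_token bos _
  unfold Spec_build_input_tokens build_input_tokens build_input_tokens_alt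
  simp only [pvLoopA_spec]
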